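-- pv_equiv track=rewrite | github.com/wooseok-AI/CodingTestStudy | BOJ/23290_마법사상어와복제.py | every_move
-- ===== SOURCE A (Python) =====
-- def every_move(shark):
--     temp = [1, 2, 3, 4]
--     log = []
--     # visited = [[0] * 4 for _ in range(4)]
--     dx, dy = (0, -1, 0, 1, 0), (0, 0, -1, 0, 1)
--
--     def dfs(x, y, array):
--         if len(array) == 3:
--             log.append(array)
--             return
--
--         for i in temp:
--             nx, ny = x+dx[i], y+dy[i]
--             if 0 <= nx < 4 and 0 <= ny < 4: #and not visited[nx][ny]:
--                 # visited[nx][ny] = 1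
--                 dfs(nx, ny, array + [i])
--                 # visited[nx][ny] = 0
--
--     dfs(shark[0],shark[1],[])
--     return log
-- ===== SOURCE B (Python) =====
-- def every_move(shark):
--     dx, dy = (0, -1, 0, 1, 0), (0, 0, -1, 0, 1)
--     log = []
--     for n in range(64):
--         moves = [n // 16 + 1, n // 4 % 4 + 1, n % 4 + 1]
--         x, y = shark[0], shark[1]
--         ok = True
--         for i in moves:
--             x, y = x + dx[i], y + dy[i]
--             if not (0 <= x < 4 and 0 <= y < 4):
--                 ok = False
--                 break
--         if ok:
--             log.append(moves)
--     return log
-- ===== Notes on version B (the rewrite author's own statement) =====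
-- stated objective: simpler
-- what changed: Replaced the recursive DFS with a single flat loop over n in range(64), decoding each n arithmetically into the move triple and simulating the three steps with an in-bounds flag.
-- outside the precondition, e.g. on every_move([0]): A raises IndexError, B raises IndexError; on every_move([1]): A raises IndexError, B raises IndexError
import Mathlib
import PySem

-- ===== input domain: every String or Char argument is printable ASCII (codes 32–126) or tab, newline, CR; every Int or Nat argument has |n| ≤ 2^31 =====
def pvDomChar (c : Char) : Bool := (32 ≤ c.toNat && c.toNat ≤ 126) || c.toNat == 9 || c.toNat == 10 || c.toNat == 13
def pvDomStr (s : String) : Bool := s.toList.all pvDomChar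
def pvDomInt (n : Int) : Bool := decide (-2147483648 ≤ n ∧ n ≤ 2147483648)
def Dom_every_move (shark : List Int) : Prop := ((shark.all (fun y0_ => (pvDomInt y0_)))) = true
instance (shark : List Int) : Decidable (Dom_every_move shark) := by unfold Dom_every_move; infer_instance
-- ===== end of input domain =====

-- B drops A's recursive DFS for one flat loop over a counter 0..63 that is decoded
-- arithmetically into the move triple and simulated with an in-bounds flag (objective: simpler).

-- ===== PORT A =====
-- dfs(x, y, array): `fuel` is the structural recursion bound (the DFS adds one move per level,
-- depth ≤ 3, so fuel = 3 - len(array) along every call and the 0 branch is unreachable);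
-- the shared mutable `log` is modelled as the fold accumulator, appended in the same order.
def pvDfsA (fuel : Nat) (x : Int) (y : Int) (array : List Int) : List (List Int) :=
    if array.length = 3 then [array]
    else
      match fuel with
      | 0 => []
      | fuel + 1 =>
        ([1, 2, 3, 4] : List Int).foldl (fun log i =>
          if 0 ≤ x + PySem.List.pyGetD ([0, -1, 0, 1, 0] : List Int) i 0 ∧
             x + PySem.List.pyGetD ([0, -1, 0, 1, 0] : List Int) i 0 < 4 ∧
             0 ≤ y + PySem.List.pyGetD ([0, 0, -1, 0, 1] : List Int) i 0 ∧
             y + PySem.List.pyGetD ([0, 0, -1, 0, 1] : List Int) i 0 < 4 then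
            log ++ pvDfsA fuel (x + PySem.List.pyGetD ([0, -1, 0, 1, 0] : List Int) i 0)
                             (y + PySem.List.pyGetD ([0, 0, -1, 0, 1] : List Int) i 0) (array ++ [i])
          else log) []

def every_move (shark : List Int) : List (List Int) :=
  match PySem.List.pyGet? shark 0, PySem.List.pyGet? shark 1 with
  | some x, some y => pvDfsA 3 x y []
  | _, _ => []   -- shark[0]/shark[1] raises IndexError: excluded by Pre_

-- ===== PORT B =====
-- one step of B's inner loop: advance (x, y) by move i if the flag is still up and the move
-- stays in bounds, else lower the flag (the flag also models python's `break`: once it is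
-- down the remaining steps change nothing)
def pvStepB (st : Int × Int × Bool) (i : Int) : Int × Int × Bool :=
  if st.2.2 then
    if 0 ≤ st.1 + PySem.List.pyGetD ([0, -1, 0, 1, 0] : List Int) i 0 ∧
       st.1 + PySem.List.pyGetD ([0, -1, 0, 1, 0] : List Int) i 0 < 4 ∧
       0 ≤ st.2.1 + PySem.List.pyGetD ([0, 0, -1, 0, 1] : List Int) i 0 ∧
       st.2.1 + PySem.List.pyGetD ([0, 0, -1, 0, 1] : List Int) i 0 < 4 then
      (st.1 + PySem.List.pyGetD ([0, -1, 0, 1, 0] : List Int) i 0,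
       st.2.1 + PySem.List.pyGetD ([0, 0, -1, 0, 1] : List Int) i 0, true)
    else (st.1, st.2.1, false)
  else st

-- B's move-triple decode of the loop counter n (python: [n // 16 + 1, n // 4 % 4 + 1, n % 4 + 1])
def pvMoves (n : Nat) : List Int :=
  [PySem.Int.floordiv (n : Int) 16 + 1,
   PySem.Int.mod (PySem.Int.floordiv (n : Int) 4) 4 + 1,
   PySem.Int.mod (n : Int) 4 + 1]

def every_move_alt (shark : List Int) : List (List Int) :=
  match PySem.List.pyGet? shark 0 with
  | none => []   -- shark[0] raises IndexError: excluded by Pre_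
  | some x =>
    match PySem.List.pyGet? shark 1 with
    | none => []   -- shark[1] raises IndexError: excluded by Pre_
    | some y =>
      (List.range 64).foldl (fun log n =>
        if ((pvMoves n).foldl pvStepB (x, y, true)).2.2 = true then log ++ [pvMoves n] else log) []

-- ===== PRECONDITION & SPEC =====
-- Pre_ excludes exactly the inputs where shark[0] or shark[1] raises IndexError (in A and in B alike).
def Pre_every_move (shark : List Int) : Prop := 2 ≤ shark.length
instance (shark : List Int) : Decidable (Pre_every_move shark) := by unfold Pre_every_move; infer_instance
def pvWitness_every_move : List Int := ([0, 0] : List Int)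

def Spec_every_move (shark : List Int) (out : List (List Int)) : Prop := out = every_move_alt shark
instance (shark : List Int) (out : List (List Int)) : Decidable (Spec_every_move shark out) := by unfold Spec_every_move; infer_instance

-- ===== CLAIM (what is proved, stated in full; the proofs are below) =====
def Claim_equal_every_move : Prop := ∀ (shark : List Int), Dom_every_move shark → Pre_every_move shark → Spec_every_move shark (every_move shark)

-- ===== LEMMAS AND PROOFS =====

-- loop shape: a fold that conditionally extends the log is a flatMap
theorem pv_foldl_ite_append {α β : Type} (c : α → Prop) [DecidablePred c] (r : α → List β) :
    ∀ (l : List α) (acc : List β),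
      l.foldl (fun a x => if c x then a ++ r x else a) acc
        = acc ++ l.flatMap (fun x => if c x then r x else []) := by
  intro l
  induction l with
  | nil => intro acc; simp
  | cons h t ih =>
    intro acc
    by_cases hc : c h <;> simp [hc, ih, List.append_assoc]

theorem pv_flatMap_congr {α β : Type} {l : List α} {f g : α → List β}
    (h : ∀ x ∈ l, f x = g x) : l.flatMap f = l.flatMap g := by
  induction l with
  | nil => rfl
  | cons a t ih =>
    simp only [List.flatMap_cons]
    rw [h a (by simp), ih (fun x hx => h x (by simp [hx]))]

-- splitting range (m*k) into an outer range m and an inner range k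
theorem pv_range_mul_flatMap {β : Type} (g : Nat → List β) (k : Nat) :
    ∀ (m : Nat), (List.range (m * k)).flatMap g
      = (List.range m).flatMap (fun a => (List.range k).flatMap (fun b => g (k * a + b))) := by
  intro m
  induction m with
  | zero => simp
  | succ m ih =>
    have hr : List.range ((m + 1) * k) = List.range (m * k) ++ (List.range k).map (m * k + ·) := by
      rw [Nat.succ_mul, List.range_add]
    rw [hr, List.flatMap_append, ih, List.range_succ, List.flatMap_append, List.flatMap_map]
    simp only [List.flatMap_cons, List.flatMap_nil, List.append_nil]
    congr 1
    apply pv_flatMap_congr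
    intro b _
    congr 1
    ring

-- one DFS level as a flatMap
theorem pv_dfs_succ (f : Nat) (x y : Int) (array : List Int) (h : ¬ array.length = 3) :
    pvDfsA (f + 1) x y array
      = ([1, 2, 3, 4] : List Int).flatMap (fun i =>
          if 0 ≤ x + PySem.List.pyGetD ([0, -1, 0, 1, 0] : List Int) i 0 ∧
             x + PySem.List.pyGetD ([0, -1, 0, 1, 0] : List Int) i 0 < 4 ∧
             0 ≤ y + PySem.List.pyGetD ([0, 0, -1, 0, 1] : List Int) i 0 ∧
             y + PySem.List.pyGetD ([0, 0, -1, 0, 1] : List Int) i 0 < 4 then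
            pvDfsA f (x + PySem.List.pyGetD ([0, -1, 0, 1, 0] : List Int) i 0)
                     (y + PySem.List.pyGetD ([0, 0, -1, 0, 1] : List Int) i 0) (array ++ [i])
          else []) := by
  have hunf : pvDfsA (f + 1) x y array
      = ([1, 2, 3, 4] : List Int).foldl (fun log i =>
          if 0 ≤ x + PySem.List.pyGetD ([0, -1, 0, 1, 0] : List Int) i 0 ∧
             x + PySem.List.pyGetD ([0, -1, 0, 1, 0] : List Int) i 0 < 4 ∧
             0 ≤ y + PySem.List.pyGetD ([0, 0, -1, 0, 1] : List Int) i 0 ∧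
             y + PySem.List.pyGetD ([0, 0, -1, 0, 1] : List Int) i 0 < 4 then
            log ++ pvDfsA f (x + PySem.List.pyGetD ([0, -1, 0, 1, 0] : List Int) i 0)
                             (y + PySem.List.pyGetD ([0, 0, -1, 0, 1] : List Int) i 0) (array ++ [i])
          else log) [] := by
    rw [pvDfsA.eq_def, if_neg h]
  rw [hunf]
  rw [pv_foldl_ite_append
        (fun i => 0 ≤ x + PySem.List.pyGetD ([0, -1, 0, 1, 0] : List Int) i 0 ∧
             x + PySem.List.pyGetD ([0, -1, 0, 1, 0] : List Int) i 0 < 4 ∧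
             0 ≤ y + PySem.List.pyGetD ([0, 0, -1, 0, 1] : List Int) i 0 ∧
             y + PySem.List.pyGetD ([0, 0, -1, 0, 1] : List Int) i 0 < 4)
        (fun i => pvDfsA f (x + PySem.List.pyGetD ([0, -1, 0, 1, 0] : List Int) i 0)
                     (y + PySem.List.pyGetD ([0, 0, -1, 0, 1] : List Int) i 0) (array ++ [i]))]
  simp

theorem pv_dfs_three (f : Nat) (x y : Int) (array : List Int) (h : array.length = 3) :
    pvDfsA f x y array = [array] := by
  rw [pvDfsA.eq_def, if_pos h]


theorem pv_dfs2 (x y i1 : Int) :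
    pvDfsA 2 x y [i1]
      = ([1, 2, 3, 4] : List Int).flatMap (fun i2 =>
          if 0 ≤ x + PySem.List.pyGetD ([0, -1, 0, 1, 0] : List Int) i2 0 ∧ x + PySem.List.pyGetD ([0, -1, 0, 1, 0] : List Int) i2 0 < 4 ∧ 0 ≤ y + PySem.List.pyGetD ([0, 0, -1, 0, 1] : List Int) i2 0 ∧ y + PySem.List.pyGetD ([0, 0, -1, 0, 1] : List Int) i2 0 < 4 then
            pvDfsA 1 (x + PySem.List.pyGetD ([0, -1, 0, 1, 0] : List Int) i2 0) (y + PySem.List.pyGetD ([0, 0, -1, 0, 1] : List Int) i2 0) [i1, i2]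
          else []) := by
  have h := pv_dfs_succ 1 x y [i1] (by simp)
  simpa using h

theorem pv_dfs1 (x y i1 i2 : Int) :
    pvDfsA 1 x y [i1, i2]
      = ([1, 2, 3, 4] : List Int).flatMap (fun i3 =>
          if 0 ≤ x + PySem.List.pyGetD ([0, -1, 0, 1, 0] : List Int) i3 0 ∧ x + PySem.List.pyGetD ([0, -1, 0, 1, 0] : List Int) i3 0 < 4 ∧ 0 ≤ y + PySem.List.pyGetD ([0, 0, -1, 0, 1] : List Int) i3 0 ∧ y + PySem.List.pyGetD ([0, 0, -1, 0, 1] : List Int) i3 0 < 4 then [[i1, i2, i3]] else []) := by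
  have h := pv_dfs_succ 0 x y [i1, i2] (by simp)
  simp only [h, List.cons_append, List.nil_append]
  refine pv_flatMap_congr ?_
  intro i3 _
  by_cases hc : 0 ≤ x + PySem.List.pyGetD ([0, -1, 0, 1, 0] : List Int) i3 0 ∧ x + PySem.List.pyGetD ([0, -1, 0, 1, 0] : List Int) i3 0 < 4 ∧ 0 ≤ y + PySem.List.pyGetD ([0, 0, -1, 0, 1] : List Int) i3 0 ∧ y + PySem.List.pyGetD ([0, 0, -1, 0, 1] : List Int) i3 0 < 4
  · rw [if_pos hc, if_pos hc, pv_dfs_three 0 _ _ _ (by simp)]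
  · rw [if_neg hc, if_neg hc]

-- B's three-step walk as three nested bound checks
theorem pv_contrib (x y i1 i2 i3 : Int) :
    (if (([i1, i2, i3] : List Int).foldl pvStepB (x, y, true)).2.2 = true
       then ([[i1, i2, i3]] : List (List Int)) else [])
      = (if 0 ≤ x + PySem.List.pyGetD ([0, -1, 0, 1, 0] : List Int) i1 0 ∧
             x + PySem.List.pyGetD ([0, -1, 0, 1, 0] : List Int) i1 0 < 4 ∧
             0 ≤ y + PySem.List.pyGetD ([0, 0, -1, 0, 1] : List Int) i1 0 ∧
             y + PySem.List.pyGetD ([0, 0, -1, 0, 1] : List Int) i1 0 < 4 then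
           (if 0 ≤ x + PySem.List.pyGetD ([0, -1, 0, 1, 0] : List Int) i1 0 + PySem.List.pyGetD ([0, -1, 0, 1, 0] : List Int) i2 0 ∧
               x + PySem.List.pyGetD ([0, -1, 0, 1, 0] : List Int) i1 0 + PySem.List.pyGetD ([0, -1, 0, 1, 0] : List Int) i2 0 < 4 ∧
               0 ≤ y + PySem.List.pyGetD ([0, 0, -1, 0, 1] : List Int) i1 0 + PySem.List.pyGetD ([0, 0, -1, 0, 1] : List Int) i2 0 ∧
               y + PySem.List.pyGetD ([0, 0, -1, 0, 1] : List Int) i1 0 + PySem.List.pyGetD ([0, 0, -1, 0, 1] : List Int) i2 0 < 4 then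
             (if 0 ≤ x + PySem.List.pyGetD ([0, -1, 0, 1, 0] : List Int) i1 0 + PySem.List.pyGetD ([0, -1, 0, 1, 0] : List Int) i2 0 + PySem.List.pyGetD ([0, -1, 0, 1, 0] : List Int) i3 0 ∧
                 x + PySem.List.pyGetD ([0, -1, 0, 1, 0] : List Int) i1 0 + PySem.List.pyGetD ([0, -1, 0, 1, 0] : List Int) i2 0 + PySem.List.pyGetD ([0, -1, 0, 1, 0] : List Int) i3 0 < 4 ∧
                 0 ≤ y + PySem.List.pyGetD ([0, 0, -1, 0, 1] : List Int) i1 0 + PySem.List.pyGetD ([0, 0, -1, 0, 1] : List Int) i2 0 + PySem.List.pyGetD ([0, 0, -1, 0, 1] : List Int) i3 0 ∧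
                 y + PySem.List.pyGetD ([0, 0, -1, 0, 1] : List Int) i1 0 + PySem.List.pyGetD ([0, 0, -1, 0, 1] : List Int) i2 0 + PySem.List.pyGetD ([0, 0, -1, 0, 1] : List Int) i3 0 < 4 then
               ([[i1, i2, i3]] : List (List Int)) else []) else []) else []) := by
  simp only [List.foldl_cons, List.foldl_nil]
  by_cases h1 : 0 ≤ x + PySem.List.pyGetD ([0, -1, 0, 1, 0] : List Int) i1 0 ∧
             x + PySem.List.pyGetD ([0, -1, 0, 1, 0] : List Int) i1 0 < 4 ∧
             0 ≤ y + PySem.List.pyGetD ([0, 0, -1, 0, 1] : List Int) i1 0 ∧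
             y + PySem.List.pyGetD ([0, 0, -1, 0, 1] : List Int) i1 0 < 4
  · simp only [show pvStepB (x, y, true) i1
        = (x + PySem.List.pyGetD ([0, -1, 0, 1, 0] : List Int) i1 0,
           y + PySem.List.pyGetD ([0, 0, -1, 0, 1] : List Int) i1 0, true) from by
        simp [pvStepB, h1]]
    rw [if_pos h1]
    by_cases h2 : 0 ≤ x + PySem.List.pyGetD ([0, -1, 0, 1, 0] : List Int) i1 0 + PySem.List.pyGetD ([0, -1, 0, 1, 0] : List Int) i2 0 ∧
               x + PySem.List.pyGetD ([0, -1, 0, 1, 0] : List Int) i1 0 + PySem.List.pyGetD ([0, -1, 0, 1, 0] : List Int) i2 0 < 4 ∧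
               0 ≤ y + PySem.List.pyGetD ([0, 0, -1, 0, 1] : List Int) i1 0 + PySem.List.pyGetD ([0, 0, -1, 0, 1] : List Int) i2 0 ∧
               y + PySem.List.pyGetD ([0, 0, -1, 0, 1] : List Int) i1 0 + PySem.List.pyGetD ([0, 0, -1, 0, 1] : List Int) i2 0 < 4
    · simp only [show pvStepB (x + PySem.List.pyGetD ([0, -1, 0, 1, 0] : List Int) i1 0,
           y + PySem.List.pyGetD ([0, 0, -1, 0, 1] : List Int) i1 0, true) i2
          = (x + PySem.List.pyGetD ([0, -1, 0, 1, 0] : List Int) i1 0 + PySem.List.pyGetD ([0, -1, 0, 1, 0] : List Int) i2 0,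
             y + PySem.List.pyGetD ([0, 0, -1, 0, 1] : List Int) i1 0 + PySem.List.pyGetD ([0, 0, -1, 0, 1] : List Int) i2 0, true) from by
          simp [pvStepB, h2]]
      rw [if_pos h2]
      by_cases h3 : 0 ≤ x + PySem.List.pyGetD ([0, -1, 0, 1, 0] : List Int) i1 0 + PySem.List.pyGetD ([0, -1, 0, 1, 0] : List Int) i2 0 + PySem.List.pyGetD ([0, -1, 0, 1, 0] : List Int) i3 0 ∧
                 x + PySem.List.pyGetD ([0, -1, 0, 1, 0] : List Int) i1 0 + PySem.List.pyGetD ([0, -1, 0, 1, 0] : List Int) i2 0 + PySem.List.pyGetD ([0, -1, 0, 1, 0] : List Int) i3 0 < 4 ∧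
                 0 ≤ y + PySem.List.pyGetD ([0, 0, -1, 0, 1] : List Int) i1 0 + PySem.List.pyGetD ([0, 0, -1, 0, 1] : List Int) i2 0 + PySem.List.pyGetD ([0, 0, -1, 0, 1] : List Int) i3 0 ∧
                 y + PySem.List.pyGetD ([0, 0, -1, 0, 1] : List Int) i1 0 + PySem.List.pyGetD ([0, 0, -1, 0, 1] : List Int) i2 0 + PySem.List.pyGetD ([0, 0, -1, 0, 1] : List Int) i3 0 < 4
      · simp [pvStepB, h3]
      · simp [pvStepB, h3]
    · simp [pvStepB, h2]
  · simp [pvStepB, h1]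

-- decoding the counter: for a, b, c < 4 the triple of n = 16a + (4b + c) is [a+1, b+1, c+1]
theorem pv_decode (a b c : Nat) (_ha : a < 4) (hb : b < 4) (hc : c < 4) :
    pvMoves (16 * a + (4 * b + c)) = [(a : Int) + 1, (b : Int) + 1, (c : Int) + 1] := by
  unfold pvMoves
  rw [PySem.Int.floordiv_eq_ediv_of_pos (by norm_num),
      PySem.Int.floordiv_eq_ediv_of_pos (by norm_num),
      PySem.Int.mod_eq_emod_of_pos (by norm_num),
      PySem.Int.mod_eq_emod_of_pos (by norm_num)]
  push_cast
  simp only [List.cons.injEq, and_true]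
  refine ⟨by omega, by omega, by omega⟩

-- the core fact: from any start cell the DFS log equals the flat 0..63 enumeration
theorem pv_core (x y : Int) :
    pvDfsA 3 x y []
      = (List.range 64).foldl (fun log n =>
          if ((pvMoves n).foldl pvStepB (x, y, true)).2.2 = true then log ++ [pvMoves n] else log) [] := by
  -- B side: fold → flatMap, then split 64 = 4 * (4 * 4)
  rw [pv_foldl_ite_append (fun n => ((pvMoves n).foldl pvStepB (x, y, true)).2.2 = true)
        (fun n => [pvMoves n])]
  rw [List.nil_append,
      show (64 : Nat) = 4 * 16 from rfl, pv_range_mul_flatMap]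
  have h16 : ∀ (a : Nat), (List.range 16).flatMap (fun r =>
      if ((pvMoves (16 * a + r)).foldl pvStepB (x, y, true)).2.2 = true then [pvMoves (16 * a + r)] else [])
      = (List.range 4).flatMap (fun b => (List.range 4).flatMap (fun c =>
          if ((pvMoves (16 * a + (4 * b + c))).foldl pvStepB (x, y, true)).2.2 = true
          then [pvMoves (16 * a + (4 * b + c))] else [])) := by
    intro a
    rw [show (16 : Nat) = 4 * 4 from rfl, pv_range_mul_flatMap]
  simp only [h16]
  -- A side: unfold the three DFS levels
  rw [pv_dfs_succ 2 x y [] (by simp)]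
  simp only [List.nil_append]
  simp only [pv_dfs2, pv_dfs1]
  rw [show ([1, 2, 3, 4] : List Int) = (List.range 4).map (fun a => ((a : Nat) : Int) + 1) from by decide]
  simp only [List.flatMap_map]
  refine pv_flatMap_congr ?_
  intro a hamem
  have ha : a < 4 := List.mem_range.mp hamem
  by_cases h1 : 0 ≤ x + PySem.List.pyGetD ([0, -1, 0, 1, 0] : List Int) (↑a + 1) 0 ∧ x + PySem.List.pyGetD ([0, -1, 0, 1, 0] : List Int) (↑a + 1) 0 < 4 ∧ 0 ≤ y + PySem.List.pyGetD ([0, 0, -1, 0, 1] : List Int) (↑a + 1) 0 ∧ y + PySem.List.pyGetD ([0, 0, -1, 0, 1] : List Int) (↑a + 1) 0 < 4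
  · rw [if_pos h1]
    refine pv_flatMap_congr ?_
    intro b hbmem
    have hb : b < 4 := List.mem_range.mp hbmem
    by_cases h2 : 0 ≤ x + PySem.List.pyGetD ([0, -1, 0, 1, 0] : List Int) (↑a + 1) 0 + PySem.List.pyGetD ([0, -1, 0, 1, 0] : List Int) (↑b + 1) 0 ∧ x + PySem.List.pyGetD ([0, -1, 0, 1, 0] : List Int) (↑a + 1) 0 + PySem.List.pyGetD ([0, -1, 0, 1, 0] : List Int) (↑b + 1) 0 < 4 ∧ 0 ≤ y + PySem.List.pyGetD ([0, 0, -1, 0, 1] : List Int) (↑a + 1) 0 + PySem.List.pyGetD ([0, 0, -1, 0, 1] : List Int) (↑b + 1) 0 ∧ y + PySem.List.pyGetD ([0, 0, -1, 0, 1] : List Int) (↑a + 1) 0 + PySem.List.pyGetD ([0, 0, -1, 0, 1] : List Int) (↑b + 1) 0 < 4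
    · rw [if_pos h2]
      refine pv_flatMap_congr ?_
      intro c hcmem
      have hc : c < 4 := List.mem_range.mp hcmem
      rw [pv_decode a b c ha hb hc, pv_contrib x y (↑a + 1) (↑b + 1) (↑c + 1), if_pos h1, if_pos h2]
    · rw [if_neg h2]
      symm
      refine Eq.trans (pv_flatMap_congr (g := fun _ => ([] : List (List Int))) ?_) (by simp)
      intro c hcmem
      have hc : c < 4 := List.mem_range.mp hcmem
      rw [pv_decode a b c ha hb hc, pv_contrib x y (↑a + 1) (↑b + 1) (↑c + 1), if_pos h1, if_neg h2]
  · rw [if_neg h1]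
    symm
    refine Eq.trans (pv_flatMap_congr (g := fun _ => ([] : List (List Int))) ?_) (by simp)
    intro b hbmem
    have hb : b < 4 := List.mem_range.mp hbmem
    refine Eq.trans (pv_flatMap_congr (g := fun _ => ([] : List (List Int))) ?_) (by simp)
    intro c hcmem
    have hc : c < 4 := List.mem_range.mp hcmem
    rw [pv_decode a b c ha hb hc, pv_contrib x y (↑a + 1) (↑b + 1) (↑c + 1), if_neg h1]

-- ===== VERDICT (by name: the statement is the Claim_ definition above) =====
theorem every_move_spec : Claim_equal_every_move := by
  intro shark _ hpre
  unfold Spec_every_move every_move every_move_alt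
  match shark, hpre with
  | x :: y :: rest, _ =>
    simp only [PySem.List.pyGet?_zero_cons]
    have h1 : PySem.List.pyGet? (x :: y :: rest) 1 = some y := by
      simp [PySem.List.pyGet?, PySem.List.pyIdx?]
    rw [h1]
    exact pv_core x y
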